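-- pv_equiv track=rewrite | github.com/costarev/ANN-2021 | 8383/Pereverzev/pr/3/main.py | func
-- ===== SOURCE A (Python) =====
-- def func(arr, x, y, n, fill):
--     startX = x - int((n)/2)
--     startY = y - int((n)/2)
--     res = [[str(fill) for idx in range(n)] for jdx in range(n)]
--     for i in range(startY, startY + n):
--         for j in range(startX, startX + n):
--             if(i >= 0 and j >= 0 and i < len(arr) and j < len(arr[0])):
--                 res[i - startY][j - startX] = arr[i][j]
--     return (res)
-- ===== SOURCE B (Python) =====
-- def func(arr, x, y, n, fill):
--     s = str(fill)
--     startX = x - int(n / 2)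
--     startY = y - int(n / 2)
--     res = []
--     for r in range(n):
--         i = startY + r
--         row = [s] * n
--         if 0 <= i < len(arr):
--             clo = max(startX, 0)
--             chi = min(startX + n, len(arr[0]))
--             if clo < chi:
--                 row = [s] * (clo - startX) + arr[i][clo:chi] + [s] * (startX + n - chi)
--         res.append(row)
--     return res
-- ===== Notes on version B (the rewrite author's own statement) =====
-- stated objective: alternative
-- what changed: B replaces A's n*n per-cell bounds test over a prefilled mutable grid by up-front min/max clipping of the overlap rectangle and builds each row directly as padding + one contiguous slice arr[i][clo:chi] + padding.
import Mathlib
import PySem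

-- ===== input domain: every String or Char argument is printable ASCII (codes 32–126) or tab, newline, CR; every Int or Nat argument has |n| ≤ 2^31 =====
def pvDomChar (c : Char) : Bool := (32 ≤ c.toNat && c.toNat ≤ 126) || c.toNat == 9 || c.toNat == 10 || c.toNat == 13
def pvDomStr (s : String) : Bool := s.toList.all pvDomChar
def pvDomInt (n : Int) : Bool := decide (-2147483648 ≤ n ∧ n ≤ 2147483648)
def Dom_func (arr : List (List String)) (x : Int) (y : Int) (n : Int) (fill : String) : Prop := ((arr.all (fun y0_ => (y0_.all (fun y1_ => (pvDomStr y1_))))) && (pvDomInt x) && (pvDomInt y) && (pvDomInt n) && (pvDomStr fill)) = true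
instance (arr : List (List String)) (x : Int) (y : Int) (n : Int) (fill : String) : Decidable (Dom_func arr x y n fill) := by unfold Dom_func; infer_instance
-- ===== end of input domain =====

-- One-line header: B clips the overlap rectangle up front and assembles each row as
-- padding ++ slice ++ padding, instead of A's per-cell in-bounds test over a mutable grid.

-- ===== PORT A =====
def func (arr : List (List String)) (x : Int) (y : Int) (n : Int) (fill : String) : List (List String) :=
  let startX := x - PySem.Int.truncdiv n 2
  let startY := y - PySem.Int.truncdiv n 2
  let res := (PySem.List.pyRange 0 n 1).map (fun _ => (PySem.List.pyRange 0 n 1).map (fun _ => fill))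
  (PySem.List.pyRange startY (startY + n) 1).foldl (fun res i =>
    (PySem.List.pyRange startX (startX + n) 1).foldl (fun res j =>
      if 0 ≤ i ∧ 0 ≤ j ∧ i < (arr.length : Int) ∧ j < ((arr.headD []).length : Int) then
        PySem.List.pySetD res (i - startY)
          (PySem.List.pySetD (PySem.List.pyGetD res (i - startY) []) (j - startX)
            (PySem.List.pyGetD (PySem.List.pyGetD arr i []) j ""))
      else res) res) res

-- ===== PORT B =====
def func_alt (arr : List (List String)) (x : Int) (y : Int) (n : Int) (fill : String) : List (List String) :=
  let startX := x - PySem.Int.truncdiv n 2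
  let startY := y - PySem.Int.truncdiv n 2
  (PySem.List.pyRange 0 n 1).foldl (fun res r =>
    let i := startY + r
    let row := List.replicate n.toNat fill
    let row :=
      if 0 ≤ i ∧ i < (arr.length : Int) then
        let clo := max startX 0
        let chi := min (startX + n) ((arr.headD []).length : Int)
        if clo < chi then
          List.replicate (clo - startX).toNat fill
            ++ PySem.List.slice (PySem.List.pyGetD arr i []) (some clo) (some chi)
            ++ List.replicate (startX + n - chi).toNat fill
        else row
      else row
    res ++ [row]) []

-- ===== PRECONDITION & SPEC =====
-- Pre_ excludes exactly the inputs on which A raises IndexError: a ragged row inside the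
-- clipped overlap rectangle shorter than the clipped column bound chi = min(startX+n, len(arr[0])).
def Pre_func (arr : List (List String)) (x : Int) (y : Int) (n : Int) (fill : String) : Prop :=
  ∀ i ∈ PySem.List.pyRange (max (y - PySem.Int.truncdiv n 2) 0)
        (min ((y - PySem.Int.truncdiv n 2) + n) (arr.length : Int)) 1,
    max (x - PySem.Int.truncdiv n 2) 0
        < min ((x - PySem.Int.truncdiv n 2) + n) ((arr.headD []).length : Int) →
    min ((x - PySem.Int.truncdiv n 2) + n) ((arr.headD []).length : Int)
        ≤ ((PySem.List.pyGetD arr i []).length : Int)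
instance (arr : List (List String)) (x : Int) (y : Int) (n : Int) (fill : String) : Decidable (Pre_func arr x y n fill) := by unfold Pre_func; infer_instance
def pvWitness_func : List (List String) × Int × Int × Int × String :=
  ([["a", "b"], ["c", "d"]], 1, 1, 3, "z")


def Spec_func (arr : List (List String)) (x : Int) (y : Int) (n : Int) (fill : String) (out : List (List String)) : Prop := out = func_alt arr x y n fill
instance (arr : List (List String)) (x : Int) (y : Int) (n : Int) (fill : String) (out : List (List String)) : Decidable (Spec_func arr x y n fill out) := by unfold Spec_func; infer_instance

-- ===== CLAIM (what is proved, stated in full; the proofs are below) =====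
def Claim_equal_func : Prop := ∀ (arr : List (List String)) (x : Int) (y : Int) (n : Int) (fill : String), Dom_func arr x y n fill → Pre_func arr x y n fill → Spec_func arr x y n fill (func arr x y n fill)

-- ===== LEMMAS AND PROOFS =====

def pvV (arr : List (List String)) (i j : Int) : String :=
  PySem.List.pyGetD (PySem.List.pyGetD arr i []) j ""
def pvRowStep (arr : List (List String)) (sx i : Int) (row : List String) (j : Int) : List String :=
  if (0 ≤ i ∧ 0 ≤ j ∧ i < (arr.length : Int) ∧ j < ((arr.headD []).length : Int)) then PySem.List.pySetD row (j - sx) (pvV arr i j) else row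

theorem pv_foldl_len {α β : Type} (f : List α → β → List α)
    (h : ∀ res j, (f res j).length = res.length) :
    ∀ (l : List β) (res : List α), (l.foldl f res).length = res.length := by
  intro l; induction l with
  | nil => intro res; rfl
  | cons j js ih => intro res; simp only [List.foldl_cons]; rw [ih, h]

theorem pv_foldl_id {α β : Type} (f : List α → β → List α) (l : List β)
    (h : ∀ res, ∀ j ∈ l, f res j = res) :
    ∀ res, l.foldl f res = res := by
  induction l with
  | nil => intro res; rfl
  | cons j js ih =>
      intro res
      rw [List.foldl_cons, h res j (by simp)]
      exact ih (fun res j hj => h res j (by simp [hj])) res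

theorem pvRowStep_len (arr : List (List String)) (sx i : Int) (b : Int) (row : List String) :
    ((PySem.List.pyRange sx b 1).foldl (pvRowStep arr sx i) row).length = row.length := by
  apply pv_foldl_len
  intro res j; unfold pvRowStep; split
  · exact PySem.List.length_pySetD _ _ _
  · rfl

theorem pv_set_getD_self {α : Type} (l : List α) (r : Nat) (d : α) :
    l.set r (l.getD r d) = l := by
  by_cases h : r < l.length
  · rw [List.getD_eq_getElem l d h]; exact List.set_getElem_self h
  · exact List.set_eq_of_length_le (by omega)

theorem pv_getD_set_self {α : Type} (l : List α) (r : Nat) (a d : α) (h : r < l.length) :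
    (l.set r a).getD r d = a := by
  simp [List.getD_eq_getElem?_getD, h]

theorem pv_grid_row (arr : List (List String)) (sx i : Int) (r : Nat) :
    ∀ (js : List Int) (grid : List (List String)),
    js.foldl (fun res j => if (0 ≤ i ∧ 0 ≤ j ∧ i < (arr.length : Int) ∧ j < ((arr.headD []).length : Int)) then
        PySem.List.pySetD res (r : Int)
          (PySem.List.pySetD (PySem.List.pyGetD res (r : Int) []) (j - sx) (pvV arr i j))
      else res) grid
    = grid.set r (js.foldl (pvRowStep arr sx i) (grid.getD r [])) := by
  intro js
  induction js with
  | nil => intro grid; exact (pv_set_getD_self grid r []).symm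
  | cons j js ih =>
      intro grid
      rw [List.foldl_cons, List.foldl_cons, ih]
      by_cases hg : (0 ≤ i ∧ 0 ≤ j ∧ i < (arr.length : Int) ∧ j < ((arr.headD []).length : Int))
      · simp only [pvRowStep, if_pos hg, PySem.List.pySetD_natCast, PySem.List.pyGetD_natCast,
          List.set_set]
        by_cases hr : r < grid.length
        · rw [pv_getD_set_self _ _ _ _ hr]
        · rw [List.set_eq_of_length_le (l := grid) (by omega),
              List.set_eq_of_length_le (l := grid) (by omega)]
      · simp only [pvRowStep, if_neg hg]

theorem pv_inner_char (arr : List (List String)) (sx i : Int) :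
    ∀ (t : Nat) (row : List String) (c : Nat),
    ((PySem.List.pyRange sx (sx + (t : Int)) 1).foldl (pvRowStep arr sx i) row)[c]?
    = if c < t ∧ (0 ≤ i ∧ 0 ≤ (sx + (c : Int)) ∧ i < (arr.length : Int) ∧ (sx + (c : Int)) < ((arr.headD []).length : Int)) then
        (row[c]?).map (fun _ => pvV arr i (sx + (c : Int)))
      else row[c]? := by
  intro t
  induction t with
  | zero =>
      intro row c
      rw [PySem.List.pyRange_one_eq_nil (by omega)]
      simp
  | succ t ih =>
      intro row c
      have hsplit : PySem.List.pyRange sx (sx + ((t : Nat) + 1 : Int)) 1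
          = PySem.List.pyRange sx (sx + (t : Int)) 1 ++ [sx + (t : Int)] := by
        rw [show sx + ((t : Nat) + 1 : Int) = (sx + (t : Int)) + 1 by ring]
        exact PySem.List.pyRange_one_succ_right (by omega)
      rw [show ((t + 1 : Nat) : Int) = ((t : Nat) + 1 : Int) by push_cast; ring, hsplit,
          List.foldl_append, List.foldl_cons, List.foldl_nil, pvRowStep,
          show sx + (t : Int) - sx = (t : Int) by ring]
      by_cases hg : (0 ≤ i ∧ 0 ≤ (sx + (t : Int)) ∧ i < (arr.length : Int) ∧ (sx + (t : Int)) < ((arr.headD []).length : Int))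
      · rw [if_pos hg, PySem.List.pySetD_natCast]
        by_cases hc : c = t
        · subst hc
          by_cases hrl : c < row.length
          · rw [List.getElem?_set_self (by rw [pvRowStep_len]; omega),
                if_pos ⟨Nat.lt_succ_self c, hg⟩, List.getElem?_eq_getElem hrl]
            rfl
          · rw [List.getElem?_eq_none (by rw [List.length_set, pvRowStep_len]; omega),
                if_pos ⟨Nat.lt_succ_self c, hg⟩, List.getElem?_eq_none (by omega)]
            rfl
        · rw [List.getElem?_set_ne (by omega), ih row c]
          by_cases h1 : c < t ∧ (0 ≤ i ∧ 0 ≤ (sx + (c : Int)) ∧ i < (arr.length : Int) ∧ (sx + (c : Int)) < ((arr.headD []).length : Int))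
          · rw [if_pos h1, if_pos ⟨by omega, h1.2⟩]
          · rw [if_neg h1, if_neg (by rintro ⟨h2, h3⟩; exact h1 ⟨by omega, h3⟩)]
      · rw [if_neg hg, ih row c]
        by_cases h1 : c < t ∧ (0 ≤ i ∧ 0 ≤ (sx + (c : Int)) ∧ i < (arr.length : Int) ∧ (sx + (c : Int)) < ((arr.headD []).length : Int))
        · rw [if_pos h1, if_pos ⟨by omega, h1.2⟩]
        · rw [if_neg h1, if_neg (by
            rintro ⟨h2, h3⟩
            refine h1 ⟨?_, h3⟩
            by_cases h4 : c = t
            · subst h4; exact absurd h3 hg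
            · omega)]

def pvRowF (arr : List (List String)) (sx n i : Int) (row : List String) : List String :=
  (PySem.List.pyRange sx (sx + n) 1).foldl (pvRowStep arr sx i) row

theorem pv_outer_len (arr : List (List String)) (sx sy n : Int) (l : List Int)
    (grid : List (List String)) :
    (l.foldl (fun res i => (PySem.List.pyRange sx (sx + n) 1).foldl (fun res j =>
        if (0 ≤ i ∧ 0 ≤ j ∧ i < (arr.length : Int) ∧ j < ((arr.headD []).length : Int)) then
          PySem.List.pySetD res (i - sy)
            (PySem.List.pySetD (PySem.List.pyGetD res (i - sy) []) (j - sx) (pvV arr i j))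
        else res) res) grid).length = grid.length := by
  apply pv_foldl_len _ _ l grid
  intro res i
  apply pv_foldl_len
  intro res j
  split
  · exact PySem.List.length_pySetD _ _ _
  · rfl

theorem pv_outer_char (arr : List (List String)) (sx sy n : Int) :
    ∀ (t : Nat) (grid : List (List String)) (k : Nat),
    ((PySem.List.pyRange sy (sy + (t : Int)) 1).foldl (fun res i =>
        (PySem.List.pyRange sx (sx + n) 1).foldl (fun res j =>
          if (0 ≤ i ∧ 0 ≤ j ∧ i < (arr.length : Int) ∧ j < ((arr.headD []).length : Int)) then
            PySem.List.pySetD res (i - sy)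
              (PySem.List.pySetD (PySem.List.pyGetD res (i - sy) []) (j - sx) (pvV arr i j))
          else res) res) grid)[k]?
    = if k < t then (grid[k]?).map (pvRowF arr sx n (sy + (k : Int))) else grid[k]? := by
  intro t
  induction t with
  | zero =>
      intro grid k
      rw [PySem.List.pyRange_one_eq_nil (a := sy) (b := sy + ((0 : Nat) : Int)) (by omega)]
      simp
  | succ t ih =>
      intro grid k
      have hsplit : PySem.List.pyRange sy (sy + ((t : Nat) + 1 : Int)) 1
          = PySem.List.pyRange sy (sy + (t : Int)) 1 ++ [sy + (t : Int)] := by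
        rw [show sy + ((t : Nat) + 1 : Int) = (sy + (t : Int)) + 1 by ring]
        exact PySem.List.pyRange_one_succ_right (by omega)
      rw [show ((t + 1 : Nat) : Int) = ((t : Nat) + 1 : Int) by push_cast; ring, hsplit,
          List.foldl_append, List.foldl_cons, List.foldl_nil]
      simp only [show sy + (t : Int) - sy = (t : Int) by ring]
      rw [pv_grid_row arr sx (sy + (t : Int)) t]
      by_cases hc : k = t
      · subst hc
        by_cases hrl : k < grid.length
        · have hglen : k < ((PySem.List.pyRange sy (sy + (k : Int)) 1).foldl (fun res i =>
              (PySem.List.pyRange sx (sx + n) 1).foldl (fun res j =>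
                if (0 ≤ i ∧ 0 ≤ j ∧ i < (arr.length : Int) ∧ j < ((arr.headD []).length : Int)) then
                  PySem.List.pySetD res (i - sy)
                    (PySem.List.pySetD (PySem.List.pyGetD res (i - sy) []) (j - sx) (pvV arr i j))
                else res) res) grid).length := by
            rw [pv_outer_len arr sx sy n]; omega
          rw [List.getElem?_set_self hglen, if_pos (Nat.lt_succ_self k)]
          have hget : ((PySem.List.pyRange sy (sy + (k : Int)) 1).foldl (fun res i =>
              (PySem.List.pyRange sx (sx + n) 1).foldl (fun res j =>
                if (0 ≤ i ∧ 0 ≤ j ∧ i < (arr.length : Int) ∧ j < ((arr.headD []).length : Int)) then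
                  PySem.List.pySetD res (i - sy)
                    (PySem.List.pySetD (PySem.List.pyGetD res (i - sy) []) (j - sx) (pvV arr i j))
                else res) res) grid).getD k []
              = grid[k] := by
            rw [List.getD_eq_getElem?_getD, ih grid k, if_neg (by omega),
                List.getElem?_eq_getElem hrl]
            rfl
          rw [hget, List.getElem?_eq_getElem hrl]
          rfl
        · rw [List.getElem?_eq_none
              (by rw [List.length_set, pv_outer_len arr sx sy n]; omega),
              if_pos (Nat.lt_succ_self k), List.getElem?_eq_none (by omega)]
          rfl
      · rw [List.getElem?_set_ne (by omega), ih grid k]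
        by_cases h1 : k < t
        · rw [if_pos h1, if_pos (by omega)]
        · rw [if_neg h1, if_neg (by omega)]

theorem pv_rowF_id_of_no_i (arr : List (List String)) (sx n i : Int)
    (h : ¬(0 ≤ i ∧ i < (arr.length : Int))) (row : List String) :
    pvRowF arr sx n i row = row := by
  apply pv_foldl_id
  intro res j _
  unfold pvRowStep
  rw [if_neg (fun hg => h ⟨hg.1, hg.2.2.1⟩)]

theorem pv_rowF_id_of_no_col (arr : List (List String)) (sx n i : Int)
    (h : ¬(max sx 0 < min (sx + n) ((arr.headD []).length : Int))) (row : List String) :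
    pvRowF arr sx n i row = row := by
  apply pv_foldl_id
  intro res j hj
  rw [PySem.List.mem_pyRange_one] at hj
  unfold pvRowStep
  rw [if_neg (fun hg => h (by
    obtain ⟨_, hj0, _, hjW⟩ := hg
    omega))]

theorem pv_row_main (arr : List (List String)) (sx n i : Int) (fill : String)
    (hi0 : 0 ≤ i) (hi1 : i < (arr.length : Int)) (hn : 0 ≤ n)
    (hcc : max sx 0 < min (sx + n) ((arr.headD []).length : Int))
    (hlen : min (sx + n) ((arr.headD []).length : Int) ≤ ((PySem.List.pyGetD arr i []).length : Int)) :
    List.replicate (max sx 0 - sx).toNat fill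
      ++ PySem.List.slice (PySem.List.pyGetD arr i []) (some (max sx 0))
          (some (min (sx + n) ((arr.headD []).length : Int)))
      ++ List.replicate (sx + n - min (sx + n) ((arr.headD []).length : Int)).toNat fill
    = pvRowF arr sx n i (List.replicate n.toNat fill) := by
  set L := PySem.List.pyGetD arr i [] with hL
  set W := ((arr.headD []).length : Int) with hW
  set clo := max sx 0 with hclo
  set chi := min (sx + n) W with hchi
  have h0clo : 0 ≤ clo := by omega
  have h0chi : 0 ≤ chi := by omega
  rw [PySem.List.slice_toNat _ h0clo h0chi]
  have hLlen : chi.toNat ≤ L.length := by omega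
  have hslen : ((L.drop clo.toNat).take (chi.toNat - clo.toNat)).length
      = chi.toNat - clo.toNat := by
    simp [List.length_take, List.length_drop]
    omega
  apply List.ext_getElem?
  intro c
  have hrfl : (pvRowF arr sx n i (List.replicate n.toNat fill))[c]?
      = if c < n.toNat ∧ (0 ≤ i ∧ 0 ≤ (sx + (c : Int)) ∧ i < (arr.length : Int) ∧ (sx + (c : Int)) < ((arr.headD []).length : Int)) then
          ((List.replicate n.toNat fill)[c]?).map (fun _ => pvV arr i (sx + (c : Int)))
        else (List.replicate n.toNat fill)[c]? := by
    unfold pvRowF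
    rw [show sx + n = sx + ((n.toNat : Nat) : Int) by omega]
    exact pv_inner_char arr sx i n.toNat (List.replicate n.toNat fill) c
  rw [hrfl]
  rw [List.getElem?_append, List.getElem?_append, List.length_append, List.length_replicate, hslen]
  by_cases c1 : c < (clo - sx).toNat
  · rw [if_pos (by omega), if_pos c1, List.getElem?_replicate, if_pos c1]
    have hng : ¬ (0 ≤ i ∧ 0 ≤ (sx + (c : Int)) ∧ i < (arr.length : Int) ∧ (sx + (c : Int)) < ((arr.headD []).length : Int)) := by
      intro hg
      obtain ⟨_, hj0, _, hjW⟩ := hg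
      omega
    rw [if_neg (fun hh => hng hh.2), List.getElem?_replicate, if_pos (by omega)]
  · by_cases c2 : c < (clo - sx).toNat + (chi.toNat - clo.toNat)
    · rw [if_pos (by omega), if_neg c1, List.getElem?_take]
      rw [if_pos (by omega), List.getElem?_drop]
      have hg : (0 ≤ i ∧ 0 ≤ (sx + (c : Int)) ∧ i < (arr.length : Int) ∧ (sx + (c : Int)) < ((arr.headD []).length : Int)) := by
        refine ⟨hi0, by omega, hi1, by omega⟩
      rw [if_pos ⟨by omega, hg⟩, List.getElem?_replicate, if_pos (by omega)]
      have hidx : clo.toNat + (c - (clo - sx).toNat) = (sx + (c : Int)).toNat := by omega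
      rw [hidx]
      have hVr : pvV arr i (sx + (c : Int)) = L[(sx + (c : Int)).toNat]'(by omega) := by
        unfold pvV
        rw [← hL]
        apply PySem.List.pyGetD_eq_getElem <;> omega
      rw [List.getElem?_eq_getElem (by omega), hVr]
      rfl
    · by_cases c3 : c < n.toNat
      · rw [if_neg (by omega), List.getElem?_replicate, if_pos (by omega)]
        have hng : ¬ (0 ≤ i ∧ 0 ≤ (sx + (c : Int)) ∧ i < (arr.length : Int) ∧ (sx + (c : Int)) < ((arr.headD []).length : Int)) := by
          intro hg
          obtain ⟨_, hj0, _, hjW⟩ := hg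
          omega
        rw [if_neg (fun hh => hng hh.2), List.getElem?_replicate, if_pos (by omega)]
      · rw [if_neg (by omega), List.getElem?_replicate, if_neg (by omega),
            if_neg (fun hh => c3 hh.1), List.getElem?_replicate, if_neg (by omega)]

theorem pv_foldl_snoc {α β : Type} (f : β → α) :
    ∀ (l : List β) (acc : List α),
    l.foldl (fun res r => res ++ [f r]) acc = acc ++ l.map f := by
  intro l
  induction l with
  | nil => intro acc; simp
  | cons r rs ih => intro acc; simp [ih]

theorem pv_outer_char' (arr : List (List String)) (sx sy n : Int) (t : Nat)
    (grid : List (List String)) (k : Nat) :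
    ((PySem.List.pyRange sy (sy + (t : Int)) 1).foldl (fun res i =>
        (PySem.List.pyRange sx (sx + n) 1).foldl (fun res j =>
          if 0 ≤ i ∧ 0 ≤ j ∧ i < (arr.length : Int) ∧ j < ((arr.headD []).length : Int) then
            PySem.List.pySetD res (i - sy)
              (PySem.List.pySetD (PySem.List.pyGetD res (i - sy) []) (j - sx)
                (PySem.List.pyGetD (PySem.List.pyGetD arr i []) j ""))
          else res) res) grid)[k]?
    = if k < t then (grid[k]?).map (pvRowF arr sx n (sy + (k : Int))) else grid[k]? := by
  have h := pv_outer_char arr sx sy n t grid k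
  simp only [pvV] at h
  exact h


-- ===== VERDICT (by name: the statement is the Claim_ definition above) =====
theorem func_spec : Claim_equal_func := by
  intro arr x y n fill _ hpre
  unfold Spec_func
  unfold func func_alt
  dsimp only
  unfold Pre_func at hpre
  set sx := x - PySem.Int.truncdiv n 2 with hsx
  set sy := y - PySem.Int.truncdiv n 2 with hsy
  by_cases hn : n ≤ 0
  · rw [PySem.List.pyRange_one_eq_nil (a := (0:Int)) (b := n) (by omega),
        PySem.List.pyRange_one_eq_nil (a := sy) (b := sy + n) (by omega)]
    simp
  · push_neg at hn
    rw [pv_foldl_snoc]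
    apply List.ext_getElem?
    intro k
    rw [show sy + n = sy + ((n.toNat : Nat) : Int) by omega]
    rw [pv_outer_char' arr sx sy n n.toNat]
    rw [List.nil_append, List.getElem?_map]
    have hfillrow : (PySem.List.pyRange 0 n 1).map (fun _ => fill) = List.replicate n.toNat fill := by
      rw [List.map_const', PySem.List.length_pyRange_one]
      norm_num
    rw [hfillrow, List.getElem?_map]
    by_cases hk : k < n.toNat
    · have hpr : (PySem.List.pyRange 0 n 1)[k]? = some (0 + (k : Int)) := by
        rw [List.getElem?_eq_getElem (by rw [PySem.List.length_pyRange_one]; omega)]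
        rw [PySem.List.getElem_pyRange_one]
      rw [if_pos hk, hpr]
      simp only [Option.map_some, zero_add, Option.some.injEq]
      by_cases hi : 0 ≤ sy + (k : Int) ∧ sy + (k : Int) < (arr.length : Int)
      · by_cases hcol : max sx 0 < min (sx + n) ((arr.headD []).length : Int)
        · rw [if_pos hi, if_pos hcol]
          exact (pv_row_main arr sx n (sy + (k : Int)) fill hi.1 hi.2 (by omega) hcol
            (hpre (sy + (k : Int)) (by rw [PySem.List.mem_pyRange_one]; omega) hcol)).symm
        · rw [if_pos hi, if_neg hcol, pv_rowF_id_of_no_col arr sx n (sy + (k : Int)) hcol]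
      · rw [if_neg hi, pv_rowF_id_of_no_i arr sx n (sy + (k : Int)) hi]
    · have hpr : (PySem.List.pyRange 0 n 1)[k]? = none :=
        List.getElem?_eq_none (by rw [PySem.List.length_pyRange_one]; omega)
      rw [if_neg hk, hpr]
      rfl
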